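-- pv_equiv track=rewrite | github.com/sspatari/Lfpc-Course-Work | LL1Parse/left_factoring.py | find_prefix_suffixes
-- ===== SOURCE A (Python) =====
-- def find_prefix_suffixes(strings, prefixes):
-- 	prefix_suffix = {}
-- 	for s in strings:
-- 		for prefix in prefixes:
-- 			if s.startswith(prefix):
-- 				if prefix in prefix_suffix:
-- 					prefix_suffix[prefix].append(s.replace(prefix, '', 1))
-- 					break
-- 				else:
-- 					prefix_suffix[prefix] = list([s.replace(prefix, '', 1)])
-- 					break
-- 	return prefix_suffix
-- ===== SOURCE B (Python) =====
-- def find_prefix_suffixes(strings, prefixes):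
--     # Head-group partition: tag every string once with its first matching prefix,
--     # then repeatedly take the head of the pending worklist, emit its whole group
--     # (all later strings with the same tag) at once, and drop them from the worklist.
--     def first_prefix(s):
--         for p in prefixes:
--             if s.startswith(p):
--                 return p
--         return None
--
--     result = []
--     pending = [(first_prefix(s), s) for s in strings]
--     while pending:
--         (p, s), rest = pending[0], pending[1:]
--         if p is None:
--             pending = rest
--             continue
--         group = [s[len(p):]] + [t[len(p):] for q, t in rest if q == p]
--         result.append((p, group))
--         pending = [(q, t) for q, t in rest if q != p]
--     return dict(result)
-- ===== Notes on version B (the rewrite author's own statement) =====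
-- stated objective: alternative
-- what changed: A folds each string into a dict, upserting at its first matching prefix; B repeatedly takes the head of a pending worklist, emits that string's whole group (all later strings with the same first matching prefix) at once, and drops the group's members from the worklist.
import Mathlib
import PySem

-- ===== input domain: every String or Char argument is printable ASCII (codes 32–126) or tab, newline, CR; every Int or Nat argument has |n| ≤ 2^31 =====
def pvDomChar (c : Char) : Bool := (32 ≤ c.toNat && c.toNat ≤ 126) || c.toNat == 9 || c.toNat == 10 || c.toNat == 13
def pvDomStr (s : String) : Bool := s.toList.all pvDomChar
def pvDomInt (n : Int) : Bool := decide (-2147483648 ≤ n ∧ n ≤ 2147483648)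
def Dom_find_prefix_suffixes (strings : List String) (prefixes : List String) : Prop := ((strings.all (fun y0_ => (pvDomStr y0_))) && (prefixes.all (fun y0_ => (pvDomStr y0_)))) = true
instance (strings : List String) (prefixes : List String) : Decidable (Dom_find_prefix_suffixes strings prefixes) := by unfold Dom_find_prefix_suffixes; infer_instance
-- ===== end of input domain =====

-- B replaces A's per-string dict-upsert fold by a head-group partition of the worklist
-- (emit each group whole, drop its members); objective: alternative decomposition, not faster.

-- ===== PORT A =====
-- hand port of Python's s.replace(old, new, 1) on code points (PySem.Str.replace has no
-- count argument): replace the FIRST occurrence of old; exact, incl. old = '' (prepends new).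
def pvReplace1 (old new : List Char) : List Char → List Char
  | [] => if PySem.Chars.startswith [] old then new else []
  | c :: t =>
    if PySem.Chars.startswith (c :: t) old then new ++ (c :: t).drop old.length
    else c :: pvReplace1 old new t

-- s.replace(prefix, '', 1)
def pvRep (s p : String) : String := String.ofList (pvReplace1 p.toList [] s.toList)

-- the inner 'for prefix in prefixes' loop with its break
def pvInnerA (d : PySem.Dict String (List String)) (s : String) :
    List String → PySem.Dict String (List String)
  | [] => d
  | p :: rest =>
    if PySem.Str.startswith s p then
      if d.contains p then d.modify p [] (· ++ [pvRep s p])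
      else d.insert p [pvRep s p]
    else pvInnerA d s rest

def find_prefix_suffixes (strings : List String) (prefixes : List String) :
    List (String × List String) :=
  (strings.foldl (fun d s => pvInnerA d s prefixes) PySem.Dict.empty).items

-- ===== PORT B =====
-- first_prefix: the for/return loop is exactly List.find?
def pvFirstPrefix (prefixes : List String) (s : String) : Option String :=
  prefixes.find? (fun p => PySem.Str.startswith s p)

-- s[len(p):]
def pvSuf (p s : String) : String := PySem.Str.slice s (some (PySem.Str.len p)) none

-- the while loop over the pending worklist of (tag, string) pairs,
-- accumulating (prefix, group) pairs
def pvBLoopT (prefixes : List String) :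
    List (String × List String) → List (Option String × String) → List (String × List String)
  | acc, [] => acc
  | acc, (q, s) :: rest =>
    match q with
    | none => pvBLoopT prefixes acc rest
    | some p =>
      pvBLoopT prefixes
        (acc ++ [(p, pvSuf p s :: (rest.filter (fun t => t.1 == some p)).map (fun t => pvSuf p t.2))])
        (rest.filter (fun t => !(t.1 == some p)))
  termination_by _ pending => pending.length
  decreasing_by
    · simp
    · have h := List.length_filter_le
        (fun x : {x // x ∈ rest} => !(x.1.1 == some p)) rest.attach
      simp at h ⊢
      omega

def find_prefix_suffixes_alt (strings : List String) (prefixes : List String) :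
    List (String × List String) :=
  (PySem.Dict.ofList (pvBLoopT prefixes []
    (strings.map (fun s => (pvFirstPrefix prefixes s, s))))).items

-- ===== PRECONDITION & SPEC =====
def Spec_find_prefix_suffixes (strings : List String) (prefixes : List String) (out : List (String × List String)) : Prop := out = find_prefix_suffixes_alt strings prefixes
instance (strings : List String) (prefixes : List String) (out : List (String × List String)) : Decidable (Spec_find_prefix_suffixes strings prefixes out) := by unfold Spec_find_prefix_suffixes; infer_instance

-- ===== CLAIM (what is proved, stated in full; the proofs are below) =====
def Claim_equal_find_prefix_suffixes : Prop := ∀ (strings : List String) (prefixes : List String), Dom_find_prefix_suffixes strings prefixes → Spec_find_prefix_suffixes strings prefixes (find_prefix_suffixes strings prefixes)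

-- ===== LEMMAS AND PROOFS =====

-- proof-side untagged version of B's worklist loop (recomputes the tag)
def pvBLoop (prefixes : List String) :
    List (String × List String) → List String → List (String × List String)
  | acc, [] => acc
  | acc, s :: rest =>
    match pvFirstPrefix prefixes s with
    | none => pvBLoop prefixes acc rest
    | some p =>
      pvBLoop prefixes
        (acc ++ [(p, pvSuf p s :: (rest.filter (fun t => pvFirstPrefix prefixes t == some p)).map (pvSuf p))])
        (rest.filter (fun t => !(pvFirstPrefix prefixes t == some p)))
  termination_by _ pending => pending.length
  decreasing_by
    · simp
    · have h := List.length_filter_le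
        (fun x : {x // x ∈ rest} => !(pvFirstPrefix prefixes x.1 == some p)) rest.attach
      simp at h ⊢
      omega

-- the tagged loop over pre-tagged strings is the untagged loop
theorem pvBLoopT_eq (prefixes : List String) :
    ∀ (pending : List String) (acc : List (String × List String)),
      pvBLoopT prefixes acc (pending.map (fun s => (pvFirstPrefix prefixes s, s))) =
        pvBLoop prefixes acc pending := by
  suffices H : ∀ (n : Nat) (pending : List String), pending.length ≤ n →
      ∀ acc, pvBLoopT prefixes acc (pending.map (fun s => (pvFirstPrefix prefixes s, s))) =
        pvBLoop prefixes acc pending from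
    fun pending acc => H pending.length pending le_rfl acc
  intro n
  induction n with
  | zero =>
    intro pending hlen acc
    have : pending = [] := List.length_eq_zero_iff.mp (Nat.le_zero.mp hlen)
    subst this; simp [pvBLoopT, pvBLoop]
  | succ n ih =>
    intro pending hlen acc
    cases pending with
    | nil => simp [pvBLoopT, pvBLoop]
    | cons s rest =>
      have hr : rest.length ≤ n := by simp at hlen; omega
      cases hfp : pvFirstPrefix prefixes s with
      | none =>
        simp only [List.map_cons, pvBLoopT, pvBLoop, hfp]
        exact ih rest hr acc
      | some p =>
        have hfil : ∀ (f : Option String → Bool),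
            ((rest.map (fun s => (pvFirstPrefix prefixes s, s))).filter (fun t => f t.1)) =
              (rest.filter (fun t => f (pvFirstPrefix prefixes t))).map
                (fun s => (pvFirstPrefix prefixes s, s)) := by
          intro f
          rw [List.filter_map]
          rfl
        have hr' : (rest.filter
            (fun t => !(pvFirstPrefix prefixes t == some p))).length ≤ n := by
          have := List.length_filter_le (fun t => !(pvFirstPrefix prefixes t == some p)) rest
          omega
        simp only [List.map_cons, pvBLoopT, pvBLoop, hfp,
          hfil (fun q => q == some p), hfil (fun q => !(q == some p)), List.map_map]
        rw [ih _ hr']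
        rfl

-- A's inner loop is: upsert at the first matching prefix (if any)
theorem pvInnerA_eq (d : PySem.Dict String (List String)) (s : String) (ps : List String) :
    pvInnerA d s ps =
      match ps.find? (fun p => PySem.Str.startswith s p) with
      | none => d
      | some p => if d.contains p then d.modify p [] (· ++ [pvRep s p]) else d.insert p [pvRep s p] := by
  induction ps with
  | nil => simp [pvInnerA]
  | cons p rest ih =>
    rw [List.find?_cons]
    by_cases h : PySem.Chars.startswith s.toList p.toList = true
    · simp [pvInnerA, PySem.Str.startswith, h]
    · simp only [Bool.not_eq_true] at h
      simp [pvInnerA, PySem.Str.startswith, h, ih]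

theorem pvInnerA_none (d : PySem.Dict String (List String)) (s : String) (ps : List String)
    (h : ps.find? (fun p => PySem.Str.startswith s p) = none) : pvInnerA d s ps = d := by
  rw [pvInnerA_eq, h]

theorem pvInnerA_some (d : PySem.Dict String (List String)) (s p : String) (ps : List String)
    (h : ps.find? (fun p => PySem.Str.startswith s p) = some p) :
    pvInnerA d s ps =
      if d.contains p then d.modify p [] (· ++ [pvRep s p]) else d.insert p [pvRep s p] := by
  rw [pvInnerA_eq, h]

-- when prefix matches, s.replace(prefix,'',1) is s[len(prefix):]
theorem pvRep_eq_pvSuf (s p : String) (h : PySem.Str.startswith s p = true) :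
    pvRep s p = pvSuf p s := by
  have h' : PySem.Chars.startswith s.toList p.toList = true := by
    simpa [PySem.Str.startswith] using h
  have hrep : pvReplace1 p.toList [] s.toList = s.toList.drop p.toList.length := by
    cases hs : s.toList with
    | nil => simp [pvReplace1, hs ▸ h']
    | cons c t => simp [pvReplace1, hs ▸ h']
  have hlen : PySem.Str.len p = ((p.toList.length : Nat) : Int) := rfl
  simp only [pvRep, pvSuf, PySem.Str.slice, PySem.Chars.slice, hrep, hlen,
    PySem.List.slice_from_natCast]

-- a string whose first matching prefix is p does start with p
theorem startswith_of_firstPrefix (prefixes : List String) (t p : String)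
    (h : pvFirstPrefix prefixes t = some p) : PySem.Str.startswith t p = true := by
  have := List.find?_some h
  simpa using this

-- the accumulator of B's loop is a pure prefix of its result
theorem pvBLoop_acc (prefixes : List String) :
    ∀ (pending : List String) (acc : List (String × List String)),
      pvBLoop prefixes acc pending = acc ++ pvBLoop prefixes [] pending := by
  suffices H : ∀ (n : Nat) (pending : List String), pending.length ≤ n →
      ∀ acc, pvBLoop prefixes acc pending = acc ++ pvBLoop prefixes [] pending from
    fun pending acc => H pending.length pending le_rfl acc
  intro n
  induction n with
  | zero =>
    intro pending hlen acc
    have : pending = [] := List.length_eq_zero_iff.mp (Nat.le_zero.mp hlen)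
    subst this; simp [pvBLoop]
  | succ n ih =>
    intro pending hlen acc
    cases pending with
    | nil => simp [pvBLoop]
    | cons s rest =>
      have hr : rest.length ≤ n := by simp at hlen; omega
      cases hfp : pvFirstPrefix prefixes s with
      | none =>
        simp only [pvBLoop, hfp]
        exact ih rest hr acc
      | some p =>
        have hr' : (rest.filter (fun t => !(pvFirstPrefix prefixes t == some p))).length ≤ n := by
          have := List.length_filter_le (fun t => !(pvFirstPrefix prefixes t == some p)) rest
          omega
        simp only [pvBLoop, hfp]
        rw [ih _ hr', ih _ hr' ([] ++ [_])]
        simp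

-- side-step lemma: a string whose first matching prefix is q ≠ p transforms the dict
-- around the distinguished (p, g) entry uniformly in g
theorem pvSide (prefixes : List String) (t p q : String)
    (hq : pvFirstPrefix prefixes t = some q) (hne : q ≠ p) :
    ∀ (l1 l2 : List (String × List String)),
      p ∉ l1.map Prod.fst → p ∉ l2.map Prod.fst →
      ∃ l1' l2', (p ∉ l1'.map Prod.fst ∧ p ∉ l2'.map Prod.fst) ∧
        ∀ g, pvInnerA (PySem.Dict.mk (l1 ++ (p, g) :: l2)) t prefixes =
             PySem.Dict.mk (l1' ++ (p, g) :: l2') := by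
  intro l1 l2 h1 h2
  have hq' : List.find? (fun p => PySem.Str.startswith t p) prefixes = some q := hq
  have hpq : (p == q) = false := by
    simp only [beq_eq_false_iff_ne]; exact fun h => hne h.symm
  by_cases hc : ((l1 ++ l2).any (fun x => x.1 == q)) = true
  · -- key q already present: overwrite in place
    refine ⟨l1.map (fun x => if x.1 == q then (q, (PySem.Dict.mk (l1 ++ (p, ([] : List String)) :: l2)).getD q [] ++ [pvRep t q]) else x),
           l2.map (fun x => if x.1 == q then (q, (PySem.Dict.mk (l1 ++ (p, ([] : List String)) :: l2)).getD q [] ++ [pvRep t q]) else x),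
           ⟨?_, ?_⟩, ?_⟩
    · intro hmem
      simp only [List.map_map, List.mem_map, Function.comp] at hmem
      obtain ⟨x, hx, hxe⟩ := hmem
      by_cases hxq : (x.1 == q) = true
      · simp [hxq] at hxe; exact hne (hxe ▸ rfl)
      · simp only [hxq, if_false, Bool.false_eq_true] at hxe
        exact h1 (List.mem_map.mpr ⟨x, hx, hxe⟩)
    · intro hmem
      simp only [List.map_map, List.mem_map, Function.comp] at hmem
      obtain ⟨x, hx, hxe⟩ := hmem
      by_cases hxq : (x.1 == q) = true
      · simp [hxq] at hxe; exact hne (hxe ▸ rfl)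
      · simp only [hxq, if_false, Bool.false_eq_true] at hxe
        exact h2 (List.mem_map.mpr ⟨x, hx, hxe⟩)
    · intro g
      rw [pvInnerA_eq, hq']
      have hcon : (PySem.Dict.mk (l1 ++ (p, g) :: l2)).contains q = true := by
        simp only [PySem.Dict.contains, PySem.Dict.items, List.any_append, List.any_cons,
          Bool.or_eq_true] at hc ⊢
        rcases hc with h | h
        · exact Or.inl h
        · exact Or.inr (Or.inr h)
      have hget : (PySem.Dict.mk (l1 ++ (p, g) :: l2)).getD q [] =
          (PySem.Dict.mk (l1 ++ (p, ([] : List String)) :: l2)).getD q [] := by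
        simp [PySem.Dict.getD, PySem.Dict.get?, PySem.Dict.items, List.find?_append,
          List.find?, hpq]
      simp only [hcon, if_true, PySem.Dict.modify, PySem.Dict.insert, hcon, if_true,
        PySem.Dict.items, List.map_append, List.map_cons, hpq, if_false, hget,
        Bool.false_eq_true]
  · -- key q absent: append at the end
    refine ⟨l1, l2 ++ [(q, [pvRep t q])], ⟨h1, ?_⟩, ?_⟩
    · intro hmem
      simp only [List.map_append, List.mem_append, List.map_cons, List.mem_cons] at hmem
      rcases hmem with h | h
      · exact h2 h
      · simp at h; exact hne (h ▸ rfl)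
    · intro g
      rw [pvInnerA_eq, hq']
      have hcon : (PySem.Dict.mk (l1 ++ (p, g) :: l2)).contains q = false := by
        simp only [PySem.Dict.contains, PySem.Dict.items, List.any_append, List.any_cons,
          Bool.or_eq_true] at hc ⊢
        push_neg at hc
        simp only [Bool.or_eq_false_iff]
        refine ⟨?_, ⟨hpq, ?_⟩⟩
        · cases h : l1.any (fun x => x.1 == q) with
          | true => exact absurd h hc.1
          | false => rfl
        · cases h : l2.any (fun x => x.1 == q) with
          | true => exact absurd h hc.2
          | false => rfl
      simp [hcon, PySem.Dict.insert, PySem.Dict.items]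

-- pull lemma: once the (p, g) entry exists, all later p-strings just append to g,
-- and can be batched out of the fold
theorem pvPull (prefixes : List String) (p : String) :
    ∀ (pending : List String) (l1 l2 : List (String × List String))
      (g : List String), p ∉ l1.map Prod.fst → p ∉ l2.map Prod.fst →
      pending.foldl (fun d s => pvInnerA d s prefixes) (PySem.Dict.mk (l1 ++ (p, g) :: l2)) =
      (pending.filter (fun t => !(pvFirstPrefix prefixes t == some p))).foldl
        (fun d s => pvInnerA d s prefixes)
        (PySem.Dict.mk (l1 ++ (p, g ++ (pending.filter (fun t => pvFirstPrefix prefixes t == some p)).map (fun t => pvRep t p)) :: l2)) := by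
  intro pending
  induction pending with
  | nil => simp
  | cons t rest ih =>
    intro l1 l2 g h1 h2
    cases hfp : pvFirstPrefix prefixes t with
    | none =>
      have hstep : ∀ (d : PySem.Dict String (List String)), pvInnerA d t prefixes = d :=
        fun d => pvInnerA_none d t prefixes hfp
      simp only [List.filter_cons, hfp,
        show ((none : Option String) == some p) = false from rfl, Bool.not_false,
        Bool.false_eq_true, if_true, if_false, reduceIte, List.foldl_cons, hstep]
      exact ih l1 l2 g h1 h2
    | some q =>
      by_cases hqp : q = p
      · rw [hqp] at hfp
        have hcon : (PySem.Dict.mk (l1 ++ (p, g) :: l2)).contains p = true := by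
          simp [PySem.Dict.contains, PySem.Dict.items]
        have hpp : ∀ (x : String × List String), x ∈ l1 → (x.1 == p) = false := by
          intro x hx
          simp only [beq_eq_false_iff_ne]
          intro hc; exact h1 (List.mem_map.mpr ⟨x, hx, hc⟩)
        have hpp2 : ∀ (x : String × List String), x ∈ l2 → (x.1 == p) = false := by
          intro x hx
          simp only [beq_eq_false_iff_ne]
          intro hc; exact h2 (List.mem_map.mpr ⟨x, hx, hc⟩)
        have hget : (PySem.Dict.mk (l1 ++ (p, g) :: l2)).getD p [] = g := by
          simp only [PySem.Dict.getD, PySem.Dict.get?, PySem.Dict.items, List.find?_append]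
          rw [List.find?_eq_none.mpr (by intro x hx; simp [hpp x hx])]
          simp [List.find?]
        have hrepl :
            ((l1 ++ (p, g) :: l2).map (fun x => if x.1 == p then (p, g ++ [pvRep t p]) else x))
              = l1 ++ (p, g ++ [pvRep t p]) :: l2 := by
          rw [List.map_append, List.map_cons]
          rw [List.map_congr_left
            (fun x hx => by simp [hpp x hx] :
              ∀ x ∈ l1, (if x.1 == p then (p, g ++ [pvRep t p]) else x) = id x), List.map_id]
          rw [List.map_congr_left
            (fun x hx => by simp [hpp2 x hx] :
              ∀ x ∈ l2, (if x.1 == p then (p, g ++ [pvRep t p]) else x) = id x), List.map_id]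
          simp
        have hstep : pvInnerA (PySem.Dict.mk (l1 ++ (p, g) :: l2)) t prefixes =
            PySem.Dict.mk (l1 ++ (p, g ++ [pvRep t p]) :: l2) := by
          rw [pvInnerA_some _ t p prefixes hfp, if_pos hcon]
          simp only [PySem.Dict.modify, hget]
          simp only [PySem.Dict.insert, hcon, if_true, PySem.Dict.items]
          exact congrArg PySem.Dict.mk hrepl
        simp only [List.filter_cons, hfp,
          show ((some p : Option String) == some p) = true from by simp, Bool.not_true,
          Bool.false_eq_true, if_true, if_false, reduceIte, List.foldl_cons, hstep]
        rw [ih l1 l2 (g ++ [pvRep t p]) h1 h2]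
        simp
      · obtain ⟨l1', l2', ⟨h1', h2'⟩, hstep⟩ := pvSide prefixes t p q hfp hqp l1 l2 h1 h2
        have hne' : ((some q : Option String) == some p) = false := by
          simp only [beq_eq_false_iff_ne, ne_eq, Option.some.injEq]; exact hqp
        simp only [List.filter_cons, hfp, hne', Bool.not_false,
          Bool.false_eq_true, if_true, if_false, reduceIte, List.foldl_cons]
        rw [hstep g, ih l1' l2' g h1' h2', hstep]

-- main invariant: A's fold over a worklist whose first-prefixes are all fresh keys
-- appends exactly B's head-group partition of that worklist
theorem pvMain (prefixes : List String) :
    ∀ (n : Nat) (pending : List String), pending.length ≤ n →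
      ∀ (d : PySem.Dict String (List String)),
        (∀ t ∈ pending, ∀ p, pvFirstPrefix prefixes t = some p → d.contains p = false) →
        (pending.foldl (fun d s => pvInnerA d s prefixes) d).items =
          d.items ++ pvBLoop prefixes [] pending := by
  intro n
  induction n with
  | zero =>
    intro pending hlen d _
    have : pending = [] := List.length_eq_zero_iff.mp (Nat.le_zero.mp hlen)
    subst this; simp [pvBLoop]
  | succ n ih =>
    intro pending hlen d hd
    cases pending with
    | nil => simp [pvBLoop]
    | cons s rest =>
      have hr : rest.length ≤ n := by simp at hlen; omega
      cases hfp : pvFirstPrefix prefixes s with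
      | none =>
        have hstep : pvInnerA d s prefixes = d := pvInnerA_none d s prefixes hfp
        simp only [List.foldl_cons, hstep, pvBLoop, hfp]
        exact ih rest hr d (fun t ht => hd t (List.mem_cons_of_mem s ht))
      | some p =>
        have hconp : d.contains p = false := hd s List.mem_cons_self p hfp
        have hpkeys : p ∉ d.items.map Prod.fst := by
          intro hmem
          obtain ⟨x, hx, hxe⟩ := List.mem_map.mp hmem
          have : d.contains p = true := by
            simp only [PySem.Dict.contains, List.any_eq_true]
            exact ⟨x, hx, by simp [hxe]⟩
          rw [hconp] at this; exact absurd this (by simp)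
        have hstep : pvInnerA d s prefixes =
            PySem.Dict.mk (d.items ++ (p, [pvRep s p]) :: []) := by
          rw [pvInnerA_some d s p prefixes hfp]
          simp [hconp, PySem.Dict.insert]
        simp only [List.foldl_cons, hstep]
        rw [pvPull prefixes p rest d.items [] [pvRep s p] hpkeys (by simp)]
        have hlen' : (rest.filter (fun t => !(pvFirstPrefix prefixes t == some p))).length ≤ n := by
          have := List.length_filter_le (fun t => !(pvFirstPrefix prefixes t == some p)) rest
          omega
        rw [ih _ hlen' _ ?_]
        · -- assemble both sides
          simp only [pvBLoop, hfp]
          rw [pvBLoop_acc prefixes _ ([] ++ [(p, _)])]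
          have hsh : pvRep s p = pvSuf p s :=
            pvRep_eq_pvSuf s p (startswith_of_firstPrefix prefixes s p hfp)
          have hmap : (rest.filter (fun t => pvFirstPrefix prefixes t == some p)).map
                (fun t => pvRep t p)
              = (rest.filter (fun t => pvFirstPrefix prefixes t == some p)).map (pvSuf p) := by
            apply List.map_congr_left
            intro t ht
            have hm : pvFirstPrefix prefixes t = some p := by
              have := List.of_mem_filter ht
              simpa using this
            exact pvRep_eq_pvSuf t p (startswith_of_firstPrefix prefixes t p hm)
          simp [hsh, hmap]
        · -- freshness is preserved for the filtered worklist
          intro t ht q hq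
          have htr : t ∈ rest := List.mem_of_mem_filter ht
          have hqp : q ≠ p := by
            have := List.of_mem_filter ht
            simp only [hq, Bool.not_eq_true', beq_eq_false_iff_ne, ne_eq,
              Option.some.injEq] at this
            exact this
          have hdq : d.contains q = false := hd t (List.mem_cons_of_mem s htr) q hq
          simp only [PySem.Dict.contains, PySem.Dict.items, List.any_append, List.any_cons,
            List.any_nil, Bool.or_eq_false_iff] at hdq ⊢
          refine ⟨hdq, ?_, trivial⟩
          simp only [beq_eq_false_iff_ne]
          exact fun h => hqp h.symm

-- keys produced by B's loop are distinct, and each comes from some pending string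
theorem pvBLoop_keys (prefixes : List String) :
    ∀ (pending : List String),
      ((pvBLoop prefixes [] pending).map Prod.fst).Nodup ∧
      ∀ q ∈ (pvBLoop prefixes [] pending).map Prod.fst,
        ∃ t ∈ pending, pvFirstPrefix prefixes t = some q := by
  suffices H : ∀ (n : Nat) (pending : List String), pending.length ≤ n →
      ((pvBLoop prefixes [] pending).map Prod.fst).Nodup ∧
      ∀ q ∈ (pvBLoop prefixes [] pending).map Prod.fst,
        ∃ t ∈ pending, pvFirstPrefix prefixes t = some q from
    fun pending => H pending.length pending le_rfl
  intro n
  induction n with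
  | zero =>
    intro pending hlen
    have : pending = [] := List.length_eq_zero_iff.mp (Nat.le_zero.mp hlen)
    subst this; simp [pvBLoop]
  | succ n ih =>
    intro pending hlen
    cases pending with
    | nil => simp [pvBLoop]
    | cons s rest =>
      have hr : rest.length ≤ n := by simp at hlen; omega
      cases hfp : pvFirstPrefix prefixes s with
      | none =>
        simp only [pvBLoop, hfp]
        refine ⟨(ih rest hr).1, fun q hq => ?_⟩
        obtain ⟨t, ht, hts⟩ := (ih rest hr).2 q hq
        exact ⟨t, List.mem_cons_of_mem s ht, hts⟩
      | some p =>
        have hr' : (rest.filter (fun t => !(pvFirstPrefix prefixes t == some p))).length ≤ n := by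
          have := List.length_filter_le (fun t => !(pvFirstPrefix prefixes t == some p)) rest
          omega
        simp only [pvBLoop, hfp]
        rw [pvBLoop_acc prefixes _ ([] ++ [(p, _)])]
        constructor
        · simp only [List.nil_append, List.singleton_append, List.map_cons, List.nodup_cons]
          refine ⟨?_, (ih _ hr').1⟩
          intro hmem
          obtain ⟨t, ht, hts⟩ := (ih _ hr').2 p hmem
          have := List.of_mem_filter ht
          simp [hts] at this
        · intro q hq
          simp only [List.nil_append, List.singleton_append, List.map_cons,
            List.mem_cons] at hq
          rcases hq with h | h
          · exact ⟨s, List.mem_cons_self, h ▸ hfp⟩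
          · obtain ⟨t, ht, hts⟩ := (ih _ hr').2 q h
            exact ⟨t, List.mem_cons_of_mem s (List.mem_of_mem_filter ht), hts⟩

-- dict(result) on a list with distinct keys is the list itself
theorem pvOfList_items (l : List (String × List String)) (h : (l.map Prod.fst).Nodup) :
    (PySem.Dict.ofList l).items = l := by
  suffices H : ∀ (l : List (String × List String)) (d : PySem.Dict String (List String)),
      (l.map Prod.fst).Nodup → (∀ k ∈ l.map Prod.fst, d.contains k = false) →
      (l.foldl (fun acc p => acc.insert p.1 p.2) d).items = d.items ++ l by
    have := H l PySem.Dict.empty h (by intro k _; rfl)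
    simpa [PySem.Dict.ofList, PySem.Dict.update, PySem.Dict.empty] using this
  intro l
  induction l with
  | nil => intro d _ _; simp
  | cons x rest ih =>
    intro d hnd hfresh
    have hcx : d.contains x.1 = false := hfresh x.1 (by simp)
    have hstep : d.insert x.1 x.2 = PySem.Dict.mk (d.items ++ [x]) := by
      simp [PySem.Dict.insert, hcx]
    simp only [List.foldl_cons, hstep]
    rw [ih _ ?_ ?_]
    · simp [PySem.Dict.items]
    · simp only [List.map_cons, List.nodup_cons] at hnd
      exact hnd.2
    · intro k hk
      have hkx : k ≠ x.1 := by
        simp only [List.map_cons, List.nodup_cons] at hnd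
        intro hc; exact hnd.1 (hc ▸ hk)
      have hdk : d.contains k = false := hfresh k (by simp [hk])
      simp only [PySem.Dict.contains, PySem.Dict.items, List.any_append, List.any_cons,
        List.any_nil, Bool.or_eq_false_iff] at hdk ⊢
      refine ⟨hdk, ?_, trivial⟩
      simp only [beq_eq_false_iff_ne]
      exact fun h => hkx h.symm

-- ===== VERDICT (by name: the statement is the Claim_ definition above) =====
theorem find_prefix_suffixes_spec : Claim_equal_find_prefix_suffixes := by
  intro strings prefixes _
  unfold Spec_find_prefix_suffixes find_prefix_suffixes find_prefix_suffixes_alt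
  rw [pvMain prefixes strings.length strings le_rfl PySem.Dict.empty (by intro t _ p _; rfl)]
  rw [pvBLoopT_eq prefixes strings []]
  rw [pvOfList_items _ (pvBLoop_keys prefixes strings).1]
  rfl
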